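-- pv_equiv track=rewrite | github.com/theinterneti/TTA | narrative-engine/tta.prototype/core/player_choice_impact_system.py | _categorize_world_change
-- ===== SOURCE A (Python) =====
-- from typing import Any
--
-- def _categorize_world_change(change_key: str, change_value: Any) -> str:
--     """Categorize a world state change."""
--     key_lower = change_key.lower()
--
--     if any(word in key_lower for word in ["location", "environment", "weather", "season"]):
--         return "environmental"
--     elif any(word in key_lower for word in ["relationship", "social", "character", "interaction"]):
--         return "social"
--     elif any(word in key_lower for word in ["emotion", "mood", "feeling", "therapeutic"]):
--         return "emotional"
--     else:
--         return "environmental"  # Default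
-- ===== SOURCE B (Python) =====
-- _WORD_RANK = [
--     ("location", 0), ("environment", 0), ("weather", 0), ("season", 0),
--     ("relationship", 1), ("social", 1), ("character", 1), ("interaction", 1),
--     ("emotion", 2), ("mood", 2), ("feeling", 2), ("therapeutic", 2),
-- ]
-- _NAMES = ["environmental", "social", "emotional", "environmental"]  # rank 3 = no match -> default
--
-- def _categorize_world_change(change_key, change_value):
--     key = change_key.lower()
--     best = 3
--     for i in range(len(key)):
--         for word, rank in _WORD_RANK:
--             if rank < best and key.startswith(word, i):
--                 best = rank
--     return _NAMES[best]
-- ===== Notes on version B (the rewrite author's own statement) =====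
-- stated objective: alternative
-- what changed: Instead of A's staged any-substring checks per category, B makes a single left-to-right scan over the positions of the lowered key, testing at each offset which ranked keyword starts there and keeping the minimum category rank, then maps the rank to the category name (rank 3 = default).
import Mathlib
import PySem

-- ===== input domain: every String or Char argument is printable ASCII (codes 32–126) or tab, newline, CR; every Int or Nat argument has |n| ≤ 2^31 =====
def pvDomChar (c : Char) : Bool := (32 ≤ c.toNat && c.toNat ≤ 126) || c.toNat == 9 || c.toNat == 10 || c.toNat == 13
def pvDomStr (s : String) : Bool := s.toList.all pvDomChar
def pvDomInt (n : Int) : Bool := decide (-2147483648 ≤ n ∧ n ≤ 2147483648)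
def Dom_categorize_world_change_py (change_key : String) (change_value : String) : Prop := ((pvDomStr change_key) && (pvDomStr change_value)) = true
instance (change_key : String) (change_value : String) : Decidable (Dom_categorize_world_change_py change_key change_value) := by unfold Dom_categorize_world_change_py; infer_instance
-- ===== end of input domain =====

-- B replaces A's staged any-substring chain by a single left-to-right scan over key positions keeping the minimum matched category rank (objective: alternative); same results.


-- ===== PORT A =====
-- A: lowercase the key, then the if-elif chain of any-substring checks.
def categorize_world_change_py (change_key : String) (change_value : String) : String :=
  let key_lower := PySem.Str.lower change_key
  if ["location", "environment", "weather", "season"].any (fun word => PySem.Str.isIn word key_lower) then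
    "environmental"
  else if ["relationship", "social", "character", "interaction"].any (fun word => PySem.Str.isIn word key_lower) then
    "social"
  else if ["emotion", "mood", "feeling", "therapeutic"].any (fun word => PySem.Str.isIn word key_lower) then
    "emotional"
  else
    "environmental"

-- ===== PORT B =====
-- B: one scan over the positions of the lowered key; at each position keep the minimum
-- rank of any keyword starting there; _NAMES[best] maps the rank back (3 = default).
def pvWordRank : List (String × Nat) :=
  [("location", 0), ("environment", 0), ("weather", 0), ("season", 0),
   ("relationship", 1), ("social", 1), ("character", 1), ("interaction", 1),
   ("emotion", 2), ("mood", 2), ("feeling", 2), ("therapeutic", 2)]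

def pvNames : List String := ["environmental", "social", "emotional", "environmental"]

def categorize_world_change_py_alt (change_key : String) (change_value : String) : String :=
  let key := PySem.Str.lower change_key
  -- key.startswith(word, i) with 0 ≤ i is exactly a prefix test on key[i:] (here on the char list);
  -- _NAMES[best] is an in-range index (best ≤ 3 by construction), ported as getD.
  let best := (List.range key.toList.length).foldl
    (fun best i => pvWordRank.foldl
      (fun best wr =>
        if wr.2 < best ∧ PySem.Chars.startswith (key.toList.drop i) wr.1.toList then wr.2 else best)
      best)
    3
  pvNames.getD best "environmental"

-- ===== PRECONDITION & SPEC =====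
def Spec_categorize_world_change_py (change_key : String) (change_value : String) (out : String) : Prop := out = categorize_world_change_py_alt change_key change_value
instance (change_key : String) (change_value : String) (out : String) : Decidable (Spec_categorize_world_change_py change_key change_value out) := by unfold Spec_categorize_world_change_py; infer_instance

-- ===== CLAIM (what is proved, stated in full; the proofs are below) =====
def Claim_equal_categorize_world_change_py : Prop := ∀ (change_key : String) (change_value : String), Dom_categorize_world_change_py change_key change_value → Spec_categorize_world_change_py change_key change_value (categorize_world_change_py change_key change_value)

-- ===== LEMMAS AND PROOFS =====

-- does any keyword w start at position i of cs?
def pvSt (cs : List Char) (w : String) (i : Nat) : Bool :=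
  PySem.Chars.startswith (cs.drop i) w.toList

def pvS0 (cs : List Char) (i : Nat) : Bool :=
  pvSt cs "location" i || pvSt cs "environment" i || pvSt cs "weather" i || pvSt cs "season" i
def pvS1 (cs : List Char) (i : Nat) : Bool :=
  pvSt cs "relationship" i || pvSt cs "social" i || pvSt cs "character" i || pvSt cs "interaction" i
def pvS2 (cs : List Char) (i : Nat) : Bool :=
  pvSt cs "emotion" i || pvSt cs "mood" i || pvSt cs "feeling" i || pvSt cs "therapeutic" i

-- minimum rank matched at position i (3 = none)
def pvH (cs : List Char) (i : Nat) : Nat :=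
  if pvS0 cs i then 0 else if pvS1 cs i then 1 else if pvS2 cs i then 2 else 3

-- a constant-rank block of the table folds to one guarded test
lemma pv_fold_const_rank (cs : List Char) (i : Nat) (ws : List String) (c : Nat) :
    ∀ b : Nat, (ws.map (fun w => (w, c))).foldl
      (fun best wr =>
        if wr.2 < best ∧ PySem.Chars.startswith (cs.drop i) wr.1.toList then wr.2 else best) b
      = if c < b ∧ ws.any (fun w => pvSt cs w i) then c else b := by
  induction ws with
  | nil => intro b; simp
  | cons w ws ih =>
    intro b
    simp only [List.map_cons, List.foldl_cons, List.any_cons, ih, pvSt]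
    by_cases hs : PySem.Chars.startswith (cs.drop i) w.toList = true <;>
      by_cases hc : c < b <;> simp [hs, hc]

lemma pv_inner_min (cs : List Char) (i : Nat) (b : Nat) (hb : b ≤ 3) :
    pvWordRank.foldl
      (fun best wr =>
        if wr.2 < best ∧ PySem.Chars.startswith (cs.drop i) wr.1.toList then wr.2 else best) b
      = min b (pvH cs i) := by
  have hsplit : pvWordRank =
      (["location", "environment", "weather", "season"].map (fun w => (w, 0)))
      ++ (["relationship", "social", "character", "interaction"].map (fun w => (w, 1)))
      ++ (["emotion", "mood", "feeling", "therapeutic"].map (fun w => (w, 2))) := rfl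
  rw [hsplit, List.foldl_append, List.foldl_append,
      pv_fold_const_rank, pv_fold_const_rank, pv_fold_const_rank]
  have h0 : (["location", "environment", "weather", "season"].any (fun w => pvSt cs w i)) = pvS0 cs i := by
    simp [pvS0, Bool.or_assoc]
  have h1 : (["relationship", "social", "character", "interaction"].any (fun w => pvSt cs w i)) = pvS1 cs i := by
    simp [pvS1, Bool.or_assoc]
  have h2 : (["emotion", "mood", "feeling", "therapeutic"].any (fun w => pvSt cs w i)) = pvS2 cs i := by
    simp [pvS2, Bool.or_assoc]
  rw [h0, h1, h2]
  unfold pvH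
  interval_cases b <;>
    cases hq0 : pvS0 cs i <;> cases hq1 : pvS1 cs i <;> cases hq2 : pvS2 cs i <;> simp

lemma pv_outer_eq (cs : List Char) (l : List Nat) :
    ∀ b : Nat, b ≤ 3 →
    l.foldl (fun best i => pvWordRank.foldl
      (fun best wr =>
        if wr.2 < best ∧ PySem.Chars.startswith (cs.drop i) wr.1.toList then wr.2 else best) best) b
      = l.foldl (fun best i => min best (pvH cs i)) b := by
  intro b hb
  induction l generalizing b with
  | nil => simp only [List.foldl_nil]
  | cons i l ih =>
    simp only [List.foldl_cons]
    rw [pv_inner_min cs i b hb]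
    exact ih _ (le_trans (Nat.min_le_left _ _) hb)

-- result of the min-fold is bounded by every pvH on the list and by the start value
lemma pv_minfold_le (cs : List Char) (l : List Nat) :
    ∀ b : Nat, l.foldl (fun best i => min best (pvH cs i)) b ≤ b ∧
      ∀ i ∈ l, l.foldl (fun best i => min best (pvH cs i)) b ≤ pvH cs i := by
  induction l with
  | nil => intro b; exact ⟨le_refl b, by simp⟩
  | cons j l ih =>
    intro b
    obtain ⟨h1, h2⟩ := ih (min b (pvH cs j))
    refine ⟨le_trans h1 (Nat.min_le_left _ _), ?_⟩
    intro i hi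
    rcases List.mem_cons.mp hi with rfl | hi
    · exact le_trans h1 (Nat.min_le_right _ _)
    · exact h2 i hi

-- the result is the start value or one of the pvH values
lemma pv_minfold_mem (cs : List Char) (l : List Nat) :
    ∀ b : Nat, l.foldl (fun best i => min best (pvH cs i)) b = b ∨
      ∃ i ∈ l, l.foldl (fun best i => min best (pvH cs i)) b = pvH cs i := by
  induction l with
  | nil => intro b; exact Or.inl rfl
  | cons j l ih =>
    intro b
    simp only [List.foldl_cons]
    rcases ih (min b (pvH cs j)) with h | ⟨i, hi, h⟩
    · rcases Nat.le_total b (pvH cs j) with hle | hle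
      · left; rw [h, Nat.min_eq_left hle]
      · right; exact ⟨j, List.mem_cons_self, by rw [h, Nat.min_eq_right hle]⟩
    · right; exact ⟨i, List.mem_cons_of_mem _ hi, h⟩

-- a nonempty word occurs somewhere in cs iff it starts at some position of cs
lemma pv_occ_iff (cs : List Char) (w : String) (hw : w.toList ≠ []) :
    (∃ i < cs.length, pvSt cs w i = true) ↔ PySem.Chars.isIn w.toList cs = true := by
  rw [← PySem.Chars.exists_prefix_drop_iff_isIn]
  constructor
  · rintro ⟨i, _, hi⟩
    exact ⟨i, (PySem.Chars.startswith_iff _ _).mp hi⟩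
  · rintro ⟨j, hj⟩
    have hlen : w.toList.length ≤ (cs.drop j).length := hj.length_le
    have hpos : 0 < w.toList.length := List.length_pos_iff.mpr hw
    have hjlt : j < cs.length := by
      simp only [List.length_drop] at hlen; omega
    exact ⟨j, hjlt, (PySem.Chars.startswith_iff _ _).mpr hj⟩

lemma pv_cat0_iff (cs : List Char) :
    (∃ i < cs.length, pvS0 cs i = true) ↔
      (PySem.Chars.isIn "location".toList cs = true ∨
      PySem.Chars.isIn "environment".toList cs = true ∨
      PySem.Chars.isIn "weather".toList cs = true ∨
      PySem.Chars.isIn "season".toList cs = true) := by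
  rw [← pv_occ_iff cs "location" (by decide), ← pv_occ_iff cs "environment" (by decide), ← pv_occ_iff cs "weather" (by decide), ← pv_occ_iff cs "season" (by decide)]
  simp only [pvS0, Bool.or_eq_true]
  constructor
  · rintro ⟨i, hi, h⟩
    rcases h with ((h | h) | h) | h
    · exact Or.inl ⟨i, hi, h⟩
    · exact Or.inr (Or.inl ⟨i, hi, h⟩)
    · exact Or.inr (Or.inr (Or.inl ⟨i, hi, h⟩))
    · exact Or.inr (Or.inr (Or.inr ⟨i, hi, h⟩))
  · rintro (⟨i, hi, h⟩ | ⟨i, hi, h⟩ | ⟨i, hi, h⟩ | ⟨i, hi, h⟩) <;> exact ⟨i, hi, by simp [h]⟩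

lemma pv_cat1_iff (cs : List Char) :
    (∃ i < cs.length, pvS1 cs i = true) ↔
      (PySem.Chars.isIn "relationship".toList cs = true ∨
      PySem.Chars.isIn "social".toList cs = true ∨
      PySem.Chars.isIn "character".toList cs = true ∨
      PySem.Chars.isIn "interaction".toList cs = true) := by
  rw [← pv_occ_iff cs "relationship" (by decide), ← pv_occ_iff cs "social" (by decide), ← pv_occ_iff cs "character" (by decide), ← pv_occ_iff cs "interaction" (by decide)]
  simp only [pvS1, Bool.or_eq_true]
  constructor
  · rintro ⟨i, hi, h⟩
    rcases h with ((h | h) | h) | h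
    · exact Or.inl ⟨i, hi, h⟩
    · exact Or.inr (Or.inl ⟨i, hi, h⟩)
    · exact Or.inr (Or.inr (Or.inl ⟨i, hi, h⟩))
    · exact Or.inr (Or.inr (Or.inr ⟨i, hi, h⟩))
  · rintro (⟨i, hi, h⟩ | ⟨i, hi, h⟩ | ⟨i, hi, h⟩ | ⟨i, hi, h⟩) <;> exact ⟨i, hi, by simp [h]⟩

lemma pv_cat2_iff (cs : List Char) :
    (∃ i < cs.length, pvS2 cs i = true) ↔
      (PySem.Chars.isIn "emotion".toList cs = true ∨
      PySem.Chars.isIn "mood".toList cs = true ∨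
      PySem.Chars.isIn "feeling".toList cs = true ∨
      PySem.Chars.isIn "therapeutic".toList cs = true) := by
  rw [← pv_occ_iff cs "emotion" (by decide), ← pv_occ_iff cs "mood" (by decide), ← pv_occ_iff cs "feeling" (by decide), ← pv_occ_iff cs "therapeutic" (by decide)]
  simp only [pvS2, Bool.or_eq_true]
  constructor
  · rintro ⟨i, hi, h⟩
    rcases h with ((h | h) | h) | h
    · exact Or.inl ⟨i, hi, h⟩
    · exact Or.inr (Or.inl ⟨i, hi, h⟩)
    · exact Or.inr (Or.inr (Or.inl ⟨i, hi, h⟩))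
    · exact Or.inr (Or.inr (Or.inr ⟨i, hi, h⟩))
  · rintro (⟨i, hi, h⟩ | ⟨i, hi, h⟩ | ⟨i, hi, h⟩ | ⟨i, hi, h⟩) <;> exact ⟨i, hi, by simp [h]⟩

-- the whole equivalence, on an abstract (already lowered) key
lemma pv_main (key : String) :
    (if ["location", "environment", "weather", "season"].any (fun word => PySem.Str.isIn word key) then
      "environmental"
    else if ["relationship", "social", "character", "interaction"].any (fun word => PySem.Str.isIn word key) then
      "social"
    else if ["emotion", "mood", "feeling", "therapeutic"].any (fun word => PySem.Str.isIn word key) then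
      "emotional"
    else
      "environmental")
    = pvNames.getD ((List.range key.toList.length).foldl
        (fun best i => pvWordRank.foldl
          (fun best wr =>
            if wr.2 < best ∧ PySem.Chars.startswith (key.toList.drop i) wr.1.toList then wr.2 else best)
          best) 3) "environmental" := by
  set cs := key.toList with hcs
  rw [pv_outer_eq cs (List.range cs.length) 3 (by norm_num)]
  set M := (List.range cs.length).foldl (fun best i => min best (pvH cs i)) 3 with hM
  obtain ⟨hMle3, hMle⟩ := pv_minfold_le cs (List.range cs.length) 3
  have hMmem := pv_minfold_mem cs (List.range cs.length) 3
  rw [← hM] at hMle3 hMle hMmem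
  have hbridge : ∀ w : String, PySem.Str.isIn w key = true ↔ PySem.Chars.isIn w.toList cs = true := by
    intro w
    rw [PySem.Str.isIn_iff_infix, PySem.Chars.isIn_iff_infix]
  have ha1 : (["location", "environment", "weather", "season"].any (fun word => PySem.Str.isIn word key)) = true
      ↔ (∃ i < cs.length, pvS0 cs i = true) := by
    rw [pv_cat0_iff]
    simp only [List.any_cons, List.any_nil, Bool.or_eq_true, Bool.false_eq_true, or_false]
    rw [hbridge, hbridge, hbridge, hbridge]
  have ha2 : (["relationship", "social", "character", "interaction"].any (fun word => PySem.Str.isIn word key)) = true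
      ↔ (∃ i < cs.length, pvS1 cs i = true) := by
    rw [pv_cat1_iff]
    simp only [List.any_cons, List.any_nil, Bool.or_eq_true, Bool.false_eq_true, or_false]
    rw [hbridge, hbridge, hbridge, hbridge]
  have ha3 : (["emotion", "mood", "feeling", "therapeutic"].any (fun word => PySem.Str.isIn word key)) = true
      ↔ (∃ i < cs.length, pvS2 cs i = true) := by
    rw [pv_cat2_iff]
    simp only [List.any_cons, List.any_nil, Bool.or_eq_true, Bool.false_eq_true, or_false]
    rw [hbridge, hbridge, hbridge, hbridge]
  by_cases h1 : ∃ i < cs.length, pvS0 cs i = true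
  · rw [if_pos (ha1.mpr h1)]
    obtain ⟨i, hi, hs⟩ := h1
    have hH : pvH cs i = 0 := by simp [pvH, hs]
    have h0 : M ≤ 0 := hH ▸ hMle i (List.mem_range.mpr hi)
    rw [Nat.le_zero.mp h0]
    rfl
  · rw [if_neg (fun hc => h1 (ha1.mp hc))]
    have hno0 : ∀ j, j < cs.length → pvS0 cs j = false := by
      intro j hj
      cases hq : pvS0 cs j
      · rfl
      · exact absurd ⟨j, hj, hq⟩ h1
    by_cases h2 : ∃ i < cs.length, pvS1 cs i = true
    · rw [if_pos (ha2.mpr h2)]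
      obtain ⟨i, hi, hs⟩ := h2
      have hH : pvH cs i = 1 := by simp [pvH, hno0 i hi, hs]
      have hle : M ≤ 1 := hH ▸ hMle i (List.mem_range.mpr hi)
      have hge : 1 ≤ M := by
        rcases hMmem with h | ⟨j, hj, hMj⟩
        · omega
        · have hj' := List.mem_range.mp hj
          rw [hMj]
          simp only [pvH, hno0 j hj', Bool.false_eq_true, if_false]
          split_ifs <;> omega
      rw [Nat.le_antisymm hle hge]
      rfl
    · rw [if_neg (fun hc => h2 (ha2.mp hc))]
      have hno1 : ∀ j, j < cs.length → pvS1 cs j = false := by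
        intro j hj
        cases hq : pvS1 cs j
        · rfl
        · exact absurd ⟨j, hj, hq⟩ h2
      by_cases h3 : ∃ i < cs.length, pvS2 cs i = true
      · rw [if_pos (ha3.mpr h3)]
        obtain ⟨i, hi, hs⟩ := h3
        have hH : pvH cs i = 2 := by simp [pvH, hno0 i hi, hno1 i hi, hs]
        have hle : M ≤ 2 := hH ▸ hMle i (List.mem_range.mpr hi)
        have hge : 2 ≤ M := by
          rcases hMmem with h | ⟨j, hj, hMj⟩
          · omega
          · have hj' := List.mem_range.mp hj
            rw [hMj]
            simp only [pvH, hno0 j hj', hno1 j hj', Bool.false_eq_true, if_false]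
            split_ifs <;> omega
        rw [Nat.le_antisymm hle hge]
        rfl
      · rw [if_neg (fun hc => h3 (ha3.mp hc))]
        have hno2 : ∀ j, j < cs.length → pvS2 cs j = false := by
          intro j hj
          cases hq : pvS2 cs j
          · rfl
          · exact absurd ⟨j, hj, hq⟩ h3
        have hM3 : M = 3 := by
          rcases hMmem with h | ⟨j, hj, hMj⟩
          · exact h
          · have hj' := List.mem_range.mp hj
            rw [hMj]
            simp [pvH, hno0 j hj', hno1 j hj', hno2 j hj']
        rw [hM3]
        rfl

-- ===== VERDICT (by name: the statement is the Claim_ definition above) =====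
theorem categorize_world_change_py_spec : Claim_equal_categorize_world_change_py := by
  intro change_key change_value _
  unfold Spec_categorize_world_change_py
  simp only [categorize_world_change_py, categorize_world_change_py_alt]
  exact pv_main (PySem.Str.lower change_key)
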